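-- pv_equiv track=rewrite | github.com/Garmelon/advent-of-code | 2017/06/solve.py | redistribute
-- ===== SOURCE A (Python) =====
-- def redistribute(buckets):
-- 	l = list(buckets)
-- 	i = l.index(max(l))
-- 	n = l[i]
-- 	l[i] = 0
--
-- 	while n > 0:
-- 		i = (i + 1) % len(l)
-- 		l[i] += 1
-- 		n -= 1
--
-- 	return tuple(l)
-- ===== SOURCE B (Python) =====
-- def redistribute(buckets):
--     l = list(buckets)
--     m = len(l)
--     n = max(l)
--     i = l.index(n)
--     if n <= 0:
--         l[i] = 0
--         return tuple(l)
--     q, r = divmod(n, m)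
--     return tuple((0 if j == i else l[j]) + q + (1 if (j - i - 1) % m < r else 0)
--                  for j in range(m))
-- ===== Notes on version B (the rewrite author's own statement) =====
-- stated objective: faster
-- what changed: Replaces the one-token-at-a-time redistribution while-loop (one iteration per unit of the max value) by a closed form: divmod(max, len) gives each bucket its full-rounds share q and the first r buckets after the max's index one extra token, built in a single comprehension over the indices.
import Mathlib
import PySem

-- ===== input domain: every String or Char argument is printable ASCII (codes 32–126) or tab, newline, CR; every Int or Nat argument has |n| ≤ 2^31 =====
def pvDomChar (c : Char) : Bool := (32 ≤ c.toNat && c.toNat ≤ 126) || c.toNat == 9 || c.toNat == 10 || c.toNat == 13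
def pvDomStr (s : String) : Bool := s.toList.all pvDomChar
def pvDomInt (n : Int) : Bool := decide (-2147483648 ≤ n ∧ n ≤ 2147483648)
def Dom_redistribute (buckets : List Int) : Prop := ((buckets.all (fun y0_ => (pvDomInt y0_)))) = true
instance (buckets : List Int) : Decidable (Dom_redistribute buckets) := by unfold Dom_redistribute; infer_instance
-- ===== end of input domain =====

-- B replaces A's one-token-at-a-time while-loop (O(max+len)) by a divmod closed form (O(len)); equal return values on nonempty input.

-- ===== PORT A =====
-- the 'while n > 0' loop of A, step for step
def redistributeLoop (l : List Int) (i n : Int) : List Int :=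
  if 0 < n then
    redistributeLoop
      (PySem.List.pySetD l (PySem.Int.mod (i + 1) (l.length : Int))
        (PySem.List.pyGetD l (PySem.Int.mod (i + 1) (l.length : Int)) 0 + 1))
      (PySem.Int.mod (i + 1) (l.length : Int)) (n - 1)
  else l
termination_by n.toNat
decreasing_by omega

def redistribute (buckets : List Int) : List Int :=
  match PySem.List.max? buckets (fun x => x) with
  | none => []   -- max([]) raises ValueError; excluded by Pre_redistribute
  | some mx =>
      -- i = l.index(max(l)); n = l[i]; l[i] = 0; then the while-loop
      redistributeLoop
        (PySem.List.pySetD buckets (((PySem.List.index? buckets mx).getD 0 : Nat) : Int) 0)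
        (((PySem.List.index? buckets mx).getD 0 : Nat) : Int)
        (PySem.List.pyGetD buckets (((PySem.List.index? buckets mx).getD 0 : Nat) : Int) 0)

-- ===== PORT B =====
def redistribute_alt (buckets : List Int) : List Int :=
  match PySem.List.max? buckets (fun x => x) with
  | none => []   -- max([]) raises ValueError; excluded by Pre_redistribute
  | some n =>
      if n ≤ 0 then buckets.set ((PySem.List.index? buckets n).getD 0) 0
      else
        -- q, r = divmod(n, m); one comprehension over range(m)
        (List.range buckets.length).map (fun j =>
          (if j = (PySem.List.index? buckets n).getD 0 then 0 else buckets.getD j 0)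
            + PySem.Int.floordiv n (buckets.length : Int)
            + (if PySem.Int.mod ((j : Int) - (((PySem.List.index? buckets n).getD 0 : Nat) : Int) - 1)
                    (buckets.length : Int)
                 < PySem.Int.mod n (buckets.length : Int) then 1 else 0))

-- ===== PRECONDITION & SPEC =====
-- Pre_ excludes only the empty list, on which A's max(l) raises ValueError.
def Pre_redistribute (buckets : List Int) : Prop := buckets ≠ []
instance (buckets : List Int) : Decidable (Pre_redistribute buckets) := by unfold Pre_redistribute; infer_instance

def pvWitness_redistribute : List Int := [0, 2, 7, 0]

def Spec_redistribute (buckets : List Int) (out : List Int) : Prop := out = redistribute_alt buckets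
instance (buckets : List Int) (out : List Int) : Decidable (Spec_redistribute buckets out) := by unfold Spec_redistribute; infer_instance

-- ===== CLAIM (what is proved, stated in full; the proofs are below) =====
def Claim_equal_redistribute : Prop := ∀ (buckets : List Int), Dom_redistribute buckets → Pre_redistribute buckets → Spec_redistribute buckets (redistribute buckets)

-- ===== LEMMAS AND PROOFS =====

-- number of k < n with k % m = d
theorem count_residue (m d : Nat) (hm : 0 < m) (hd : d < m) (n : Nat) :
    (List.range n).countP (fun k => k % m == d) = n / m + (if d < n % m then 1 else 0) := by
  induction n with
  | zero => simp [Nat.not_lt.mpr (Nat.zero_le d)]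
  | succ n ih =>
    rw [List.range_succ, List.countP_append, ih]
    have hdm := Nat.div_add_mod n m
    have hrm : n % m < m := Nat.mod_lt _ hm
    by_cases hcase : n % m + 1 = m
    · have key : n + 1 = m * (n / m + 1) := by rw [Nat.mul_succ]; omega
      have h1 : (n + 1) % m = 0 := by rw [key]; exact Nat.mul_mod_right m _
      have h2 : (n + 1) / m = n / m + 1 := by rw [key]; exact Nat.mul_div_cancel_left _ hm
      rw [h1, h2]
      simp only [List.countP_cons, List.countP_nil, beq_iff_eq]
      split_ifs <;> omega
    · have key : n + 1 = m * (n / m) + (n % m + 1) := by omega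
      have h1 : (n + 1) % m = n % m + 1 := by
        conv_lhs => rw [key]
        rw [Nat.mul_add_mod]
        exact Nat.mod_eq_of_lt (by omega)
      have h2 : (n + 1) / m = n / m := by
        have hsmall : (n % m + 1) / m = 0 := Nat.div_eq_of_lt (by omega)
        rw [key, Nat.mul_add_div hm, hsmall, Nat.add_zero]
      rw [h1, h2]
      simp only [List.countP_cons, List.countP_nil, beq_iff_eq]
      split_ifs <;> omega

-- a list is the map of getD over its index range
theorem map_getD_range (l : List Int) : (List.range l.length).map (fun j => l.getD j 0) = l := by
  apply List.ext_getElem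
  · simp
  · intro i h1 h2
    simp [List.getD_eq_getElem?_getD, List.getElem?_eq_getElem h2]

def hits (m i n j : Nat) : Nat := (List.range n).countP (fun k => (i + 1 + k) % m == j)

-- elementwise characterisation of A's while-loop
theorem redistributeLoop_eq_map (n : Nat) : ∀ (l : List Int) (i : Nat), i < l.length →
    redistributeLoop l (i : Int) ((n : Nat) : Int) =
      (List.range l.length).map (fun j => l.getD j 0 + (hits l.length i n j : Int)) := by
  induction n with
  | zero =>
    intro l i hi
    rw [redistributeLoop, if_neg (by simp)]
    have hz : ∀ j, hits l.length i 0 j = 0 := fun j => by simp [hits]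
    simp only [hz, Nat.cast_zero, add_zero]
    exact (map_getD_range l).symm
  | succ n ih =>
    intro l i hi
    have hm : 0 < l.length := by omega
    rw [redistributeLoop]
    rw [if_pos (by exact_mod_cast Nat.succ_pos n)]
    have hc : ((i : Int) + 1) = ((i + 1 : Nat) : Int) := by push_cast; ring
    rw [hc, PySem.Int.mod_natCast]
    set i₁ := (i + 1) % l.length with hi₁
    have hi₁lt : i₁ < l.length := Nat.mod_lt _ hm
    rw [PySem.List.pyGetD_natCast, PySem.List.pySetD_natCast]
    have hn1 : (((n + 1 : Nat) : Int) - 1) = ((n : Nat) : Int) := by push_cast; ring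
    rw [hn1]
    set l' := l.set i₁ (l.getD i₁ 0 + 1) with hl'
    have hlen' : l'.length = l.length := by simp [hl']
    rw [ih l' i₁ (by omega), hlen']
    apply List.map_congr_left
    intro j hj
    rw [List.mem_range] at hj
    have hget : l'.getD j 0 = l.getD j 0 + (if j = i₁ then 1 else 0) := by
      by_cases h : j = i₁
      · subst h
        simp [hl', List.getD_eq_getElem?_getD, List.getElem?_set_eq_of_lt _ hi₁lt]
      · simp [hl', List.getD_eq_getElem?_getD, List.getElem?_set_ne (fun hh => h hh.symm), h]
    have hpt : ∀ k ∈ List.range n,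
        ((fun k => (i + 1 + k) % l.length == j) ∘ Nat.succ) k = ((i₁ + 1 + k) % l.length == j) := by
      intro k _
      simp only [Function.comp_apply]
      congr 1
      show (i + 1 + (k + 1)) % l.length = (i₁ + 1 + k) % l.length
      rw [show i + 1 + (k + 1) = (i + 1) + (1 + k) by omega, ← Nat.mod_add_mod, ← hi₁,
          show i₁ + (1 + k) = i₁ + 1 + k by omega]
    have hhitsN : hits l.length i (n + 1) j = (if j = i₁ then 1 else 0) + hits l.length i₁ n j := by
      unfold hits
      rw [List.range_succ_eq_map, List.countP_cons, List.countP_map, List.countP_congr (fun k hk => by rw [hpt k hk]),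
          Nat.add_zero, ← hi₁]
      by_cases h : j = i₁
      · subst h; simp [Nat.add_comm]
      · simp [h, show i₁ ≠ j from fun hh => h hh.symm]
    rw [hget, hhitsN]
    push_cast
    ring

-- congruence bridge: (i+1+k) % m = j ↔ k % m = d, d the Int-residue of j-i-1
theorem cond_bridge (m i j k : Nat) (hm : 0 < m) (hj : j < m) :
    ((i + 1 + k) % m = j) ↔ (k % m = (((j : Int) - i - 1) % (m : Int)).toNat) := by
  have hmz : (m : Int) ≠ 0 := by exact_mod_cast hm.ne'
  have hd0 : 0 ≤ ((j : Int) - i - 1) % (m : Int) := Int.emod_nonneg _ hmz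
  have hdlt : ((j : Int) - i - 1) % (m : Int) < m := Int.emod_lt_of_pos _ (by exact_mod_cast hm)
  have hjm : (j : Int) % m = j := Int.emod_eq_of_lt (by positivity) (by exact_mod_cast hj)
  constructor
  · intro h
    have hI : ((i : Int) + 1 + k) % m = j := by
      have hc := congrArg (Nat.cast : Nat → Int) h
      push_cast at hc
      exact hc
    have h2 : ((i : Int) + 1 + k - j) % m = 0 := by
      apply Int.emod_eq_emod_iff_emod_sub_eq_zero.mp
      rw [hI, hjm]
    have hsub : ((k : Int) - ((j : Int) - i - 1)) % m = 0 := by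
      rw [show (k : Int) - ((j : Int) - i - 1) = (i : Int) + 1 + k - j by ring]
      exact h2
    have hkm : ((k : Int)) % m = ((j : Int) - i - 1) % m :=
      Int.emod_eq_emod_iff_emod_sub_eq_zero.mpr hsub
    have hfin : ((k % m : Nat) : Int) = ((j : Int) - i - 1) % m := by
      push_cast
      exact hkm
    omega
  · intro h
    have hkm : (k : Int) % m = ((j : Int) - i - 1) % m := by
      have hc := congrArg (Nat.cast : Nat → Int) h
      push_cast at hc
      rw [hc]
      omega
    have h2 : ((k : Int) - ((j : Int) - i - 1)) % m = 0 :=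
      Int.emod_eq_emod_iff_emod_sub_eq_zero.mp hkm
    have hI : ((i : Int) + 1 + k) % m = (j : Int) % m := by
      apply Int.emod_eq_emod_iff_emod_sub_eq_zero.mpr
      rw [show (i : Int) + 1 + k - j = (k : Int) - ((j : Int) - i - 1) by ring]
      exact h2
    rw [hjm] at hI
    have hfin : (((i + 1 + k) % m : Nat) : Int) = (j : Int) := by
      push_cast
      exact hI
    omega

-- ===== VERDICT (by name: the statement is the Claim_ definition above) =====
theorem redistribute_spec : Claim_equal_redistribute := by
  intro buckets _ hpre
  unfold Spec_redistribute redistribute redistribute_alt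
  cases hmax : PySem.List.max? buckets (fun x => x) with
  | none => exact absurd ((PySem.List.max?_eq_none_iff _ _).mp hmax) hpre
  | some mx =>
    have hmem : mx ∈ buckets := PySem.List.max?_mem hmax
    have hidx : (PySem.List.index? buckets mx).isSome :=
      (PySem.List.index?_isSome_iff _ _).mpr hmem
    cases hsome : PySem.List.index? buckets mx with
    | none => rw [hsome] at hidx; simp at hidx
    | some iN =>
      dsimp only
      rw [hsome]
      simp only [Option.getD_some]
      obtain ⟨hilt, hival, _⟩ := PySem.List.getElem_of_index?_eq_some hsome
      have hm : 0 < buckets.length := by omega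
      simp only [PySem.List.pyGetD_natCast, PySem.List.pySetD_natCast]
      have hgetd : buckets.getD iN 0 = mx := by
        rw [List.getD_eq_getElem?_getD, List.getElem?_eq_getElem hilt, hival]; rfl
      rw [hgetd]
      by_cases hmx : mx ≤ 0
      · rw [redistributeLoop, if_neg (by omega), if_pos hmx]
      · rw [if_neg hmx]
        have hmxn : mx = ((mx.toNat : Nat) : Int) := by omega
        rw [hmxn]
        have hlen : (buckets.set iN 0).length = buckets.length := by simp
        rw [redistributeLoop_eq_map mx.toNat (buckets.set iN 0) iN (by omega), hlen]
        apply List.map_congr_left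
        intro j hj
        rw [List.mem_range] at hj
        have hLget : (buckets.set iN 0).getD j 0 = (if j = iN then 0 else buckets.getD j 0) := by
          by_cases h : j = iN
          · subst h
            simp [List.getD_eq_getElem?_getD, List.getElem?_set_eq_of_lt _ hilt]
          · simp [List.getD_eq_getElem?_getD, List.getElem?_set_ne (fun hh => h hh.symm), h]
        set d := (((j : Int) - iN - 1) % (buckets.length : Int)).toNat with hd
        have hmz : (buckets.length : Int) ≠ 0 := by exact_mod_cast hm.ne'
        have hd0 : 0 ≤ ((j : Int) - iN - 1) % (buckets.length : Int) := Int.emod_nonneg _ hmz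
        have hdlt : ((j : Int) - iN - 1) % (buckets.length : Int) < buckets.length :=
          Int.emod_lt_of_pos _ (by exact_mod_cast hm)
        have hdm : d < buckets.length := by omega
        have hcount : hits buckets.length iN mx.toNat j =
            mx.toNat / buckets.length + (if d < mx.toNat % buckets.length then 1 else 0) := by
          unfold hits
          rw [← count_residue buckets.length d hm hdm mx.toNat]
          refine List.countP_congr (fun k _ => ?_)
          have hcb := cond_bridge buckets.length iN j k hm hj
          rw [← hd] at hcb
          simp only [beq_iff_eq]
          exact hcb
        have hq : PySem.Int.floordiv ((mx.toNat : Nat) : Int) (buckets.length : Int)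
            = ((mx.toNat / buckets.length : Nat) : Int) := PySem.Int.floordiv_natCast _ _
        have hr : PySem.Int.mod ((mx.toNat : Nat) : Int) (buckets.length : Int)
            = ((mx.toNat % buckets.length : Nat) : Int) := PySem.Int.mod_natCast _ _
        have hmodB : PySem.Int.mod ((j : Int) - iN - 1) (buckets.length : Int) = (d : Int) := by
          rw [PySem.Int.mod_eq_emod_of_pos (by exact_mod_cast hm : (0:Int) < (buckets.length : Int)), hd]
          omega
        rw [hLget, hcount, hq, hr]
        simp only [hmodB, Nat.cast_add, Nat.cast_ite, Nat.cast_one,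
          Nat.cast_zero, Nat.cast_lt]
        ring
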